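/- GENERATED by mk_final_copies.py from the proof of the farm's unit `vorbis_decode_packet_rest.2d` (farm:vorbis_decode_packet_rest.2d.1: Proof.lean) as the
   re-elaboration sweep compiled it — do not edit. -/
import Asan.CheckWalk
import Vorbis.Spec.PacketRestFrame
import Vorbis.Spec.Units.vorbis_decode_packet_rest_2d

/-
  UNIT vorbis_decode_packet_rest.2d — segment 2d of `vorbis_decode_packet_rest` (0x111426–0x111452; stb_vorbis_fixed.c 3241–3242):

      0x111426 (cut21, `At2d`)   mov ebx, eax ; lea rdi, [r12 + 2] ; call __asan_store2_noabort ; mov word [r12 + 2], bx   -- finalY[1] = …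
                                 mov dword [rsp + 0x8], 2 ; mov dword [rsp + 0x48], 0                                   -- offset = 2 ; j = 0
                                 mov dword [rsp + 0x54], r14d ; mov qword [rsp + 0x58], r13 ; jmp 0x110e7e              -- the spills of i, map
      exit 0x110e7e (cut8, `At3 … i 0`): the head of the partition loop.

  The check site 0x11142d: `finalY[1]` lies inside the allocated block at `f->finalY[i]`, of `ysz i ≥ 2·values ≥ 4` bytes (FY1, FL8).
  STABLE over the six stores (the return address of the check call, `finalY[1]`, four scratch slots) is `Stable.carry`.
-/

open X86 X86.User Asan Vorbis Vorbis.Spec Vorbis.Spec.vorbis_decode_packet_rest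

set_option maxRecDepth 4000
set_option maxHeartbeats 4000000

namespace Vorbis.Spec.vorbis_decode_packet_rest_2d

/-- **The block at `finalY[i]` has room for `finalY[0]` and `finalY[1]`**: `ysz i ≥ 2·values` for every floor (FY1 with the sizes
named: `DecodeInv.fy`) and `values ≥ 2` (FL8). -/
theorem seg2d_ysz_ge {others : List Obj} {frames' : List (Nat × FrameLayout)} {len : Nat} {Ar : Arena} {stored room : Int}
    {ysz : Nat → Nat} {mem : Mem} {f i g : Nat}
    (hinv : DecodeInv others frames' len Ar stored room ysz mem f)
    (hi : (i : Int) < stb_vorbis.channels mem f) (hg : IsFloor mem f g) : 4 ≤ ysz i := by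
  obtain ⟨idx, hidx, hgeq⟩ := hg
  have hvb := (hinv.fb.vorbis.floor.floors idx hidx).values_bounds
  have hsz := (hinv.fy i hi).2 idx hidx
  omega

/-- **Where the block at `finalY[i]` lies** (a non-empty one): it is a setup block of the arena, hence above the text, below
C00000H, either below the stack region or at least 32 bytes above its end (the arena's first red zone), and disjoint from `*f`. -/
theorem seg2d_fy_where {others : List Obj} {frames' : List (Nat × FrameLayout)} {len : Nat} {Ar : Arena} {stored room : Int}
    {ysz : Nat → Nat} {mem : Mem} {f i : Nat}
    (hinv : DecodeInv others frames' len Ar stored room ysz mem f)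
    (hi : (i : Int) < stb_vorbis.channels mem f) (hpos : 0 < ysz i) :
    Vorbis.L.textHi ≤ stb_vorbis.finalY mem f i ∧ stb_vorbis.finalY mem f i + ysz i ≤ 0xC00000 ∧
      (stb_vorbis.finalY mem f i + ysz i ≤ 0x700000 ∨ 0x800020 ≤ stb_vorbis.finalY mem f i) ∧
      (stb_vorbis.finalY mem f i + ysz i ≤ f ∨ f + 1808 ≤ stb_vorbis.finalY mem f i) := by
  have hb := (hinv.fy i hi).1
  have hA := hinv.arena
  have htext := hinv.arenaText
  have hC : SampleBuf (RunBlk Ar len) mem f ⟨stb_vorbis.finalY mem f i, ysz i⟩ := SampleBuf.finalY i hi (ysz i) hb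
  have hdis := hinv.sep.bufobj _ hC
  simp only [vblock, voff] at hdis
  rcases hinv.buf _ hC with h0 | hblk
  · simp only [] at h0
    omega
  · have hr := hA.block_range (p := stb_vorbis.finalY mem f i) (n := ysz i) hblk
    have hl := le_r8 (ysz i)
    have h1 := hA.AR1
    have h1x := hA.AR1x
    have h2 := hA.AR2
    omega

end Vorbis.Spec.vorbis_decode_packet_rest_2d

/-- Segment 2d of `vorbis_decode_packet_rest` (`cut21` … `cut8`): from `At2d` to `At3 … i 0`. -/
theorem Vorbis.Spec.Worked.vorbis_decode_packet_rest_2d_ok : Vorbis.Spec.vorbis_decode_packet_rest_2d.Statement := by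
  intro Lay hLay μ hμ u₀ hcode hstore2
  intro others frames len Ar stored room mode ysz e ret i v hat
  -- 1. the ENTRY state's facts
  have he := hat.entry
  v_entry he
  -- 2. the present state
  have w_rip := hat.rip
  have c_rsp : v.reg .rsp = e.reg .rsp - 3000 := hat.rsp
  have c_r14 : v.reg .r14 = UInt64.ofNat i := hat.r14
  have w_kept : RegsKept [.rsp] v v := RegsKept.refl _ _
  have w_eq : Mem.EqOn Vorbis.L.textLo Vorbis.L.textHi u₀.mem v.mem := hat.code
  have hdf : v.flags .df = false := (show abiInv _ from hat.abi).1
  have hmx : v.mxcsr &&& 0x1F80 = 0x1F80 := (show abiInv _ from hat.abi).2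
  have hsse := Vorbis.sseOK_of_abiInv hat.abi
  have hinv := hat.inv
  -- the block at `finalY[i]`
  obtain ⟨fy, hfy⟩ : ∃ fy : Nat, stb_vorbis.finalY v.mem (fOf e) i = fy := ⟨_, rfl⟩
  have hr12 : (v.reg .r12).toNat = fy := by
    rw [← hfy]
    exact hat.r12
  have hysz : 4 ≤ ysz i := Vorbis.Spec.vorbis_decode_packet_rest_2d.seg2d_ysz_ge hinv hat.i_lt hat.g
  have hpos : 0 < ysz i := by omega
  obtain ⟨hfy1, hfy2, hfy3, hfy4⟩ := Vorbis.Spec.vorbis_decode_packet_rest_2d.seg2d_fy_where hinv hat.i_lt hpos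
  rw [hfy] at hfy1 hfy2 hfy3 hfy4
  have hfy1' : 0x119d40 ≤ fy := hfy1
  u_walk hcode [hμ.vendor] until [Vorbis.L.vorbis_decode_packet_rest.cut8] span [Vorbis.L.textLo, Vorbis.L.textHi] side (v_side)
  · -- 0x11142d, line 3241: the check of `finalY[1]`: inside the block at `finalY[i]` (FY1, FL8: `4 ≤ 2 * values ≤ ysz i`)
    have hun : ShadowUntouched v.mem s_11142d.mem := by v_untouched
    have hblk := (hinv.fy i hat.i_lt).1
    rw [hfy] at hblk
    have hsite : Site (LiveSet others (framesIn frames e)) (fy + 2) 2 :=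
      Site.of_blk hinv.live hblk (by simp only []; omega) (by simp only []; omega) (by omega)
    exact Vorbis.Spec.check_site hat.shadow hun hsite (by u_omega)
  · -- 0x110e7e (cut8): the exit assertion `At3 … i 0`
    have hC16 := hinv.config.header.HD1.2
    have hilt := hat.i_lt
    have hi16 : i < 16 := by omega
    -- the scratch slots the assertion names, read in the walker's memory
    have k_off : s_111452.mem.readLE (e.reg .rsp - 2992) 4 = 2 := by u_read
    have k_j : s_111452.mem.readLE (e.reg .rsp - 2928) 4 = 0 := by u_read
    rw [cnt32_part_toNat i (by omega)] at w_mem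
    have k_i : s_111452.mem.readLE (e.reg .rsp - 2916) 4 = i := by u_read
    have k_map : s_111452.mem.readLE (e.reg .rsp - 2912) 8 = (v.reg .r13).toNat := by u_read
    have k_fy0 : v.mem.readLE (e.reg .rsp - 2968) 8 = fy := by
      have := hat.slot_finalY
      simp only [slot64, spOf, addr_norm] at this
      rw [hfy] at this
      exact this
    have k_fy : s_111452.mem.readLE (e.reg .rsp - 2968) 8 = fy := by u_frame k_fy0
    -- what was written since the cut: the return address of the check call, `finalY[1]`, four scratch slots
    have hs : Mem.SameExcept [⟨(e.reg .rsp).toNat - 3008, (e.reg .rsp).toNat - 3000⟩, ⟨fy + 2, fy + 4⟩,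
        ⟨(e.reg .rsp).toNat - 2992, (e.reg .rsp).toNat - 2988⟩, ⟨(e.reg .rsp).toNat - 2928, (e.reg .rsp).toNat - 2924⟩,
        ⟨(e.reg .rsp).toNat - 2916, (e.reg .rsp).toNat - 2904⟩] v.mem s_111452.mem := by
      u_same
    have hsp : ∀ w, w ∈ [(⟨(e.reg .rsp).toNat - 3008, (e.reg .rsp).toNat - 3000⟩ : Span), ⟨fy + 2, fy + 4⟩,
        ⟨(e.reg .rsp).toNat - 2992, (e.reg .rsp).toNat - 2988⟩, ⟨(e.reg .rsp).toNat - 2928, (e.reg .rsp).toNat - 2924⟩,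
        ⟨(e.reg .rsp).toNat - 2916, (e.reg .rsp).toNat - 2904⟩] →
        SpanOK ysz v.mem (e.reg .rsp).toNat (fOf e) w := by
      intro w hw
      simp only [List.mem_cons, List.mem_nil_iff, or_false] at hw
      rcases hw with rfl | rfl | rfl | rfl | rfl
      · exact SpanOK.below (by simp only []; omega) (by simp only []; omega)
      · apply SpanOK.finalY i hat.i_lt
        · rw [hfy]
          simp only []
          omega
        · simp only []
          omega
        · rw [hfy]
          simp only []
          omega
      · exact SpanOK.below (by simp only []; omega) (by simp only []; omega)
      · exact Or.inl ⟨by simp only []; omega, by simp only []; omega,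
          Or.inr (Or.inl ⟨by simp only []; omega, by simp only []; omega⟩)⟩
      · exact Or.inl ⟨by simp only []; omega, by simp only []; omega,
          Or.inr (Or.inr (Or.inl ⟨by simp only []; omega, by simp only []; omega⟩))⟩
    have hun : ShadowUntouched v.mem s_111452.mem := by v_untouched
    -- `*f` was not written: `Bits` is carried
    have hobj : (objBlock (fOf e)).Same v.mem s_111452.mem := by
      apply hs.eqOn
      intro w hw
      simp only [List.mem_cons, List.mem_nil_iff, or_false] at hw
      obtain ⟨hfoff, _⟩ := SpanOK.geom_obj hinv he_top
      rcases hw with rfl | rfl | rfl | rfl | rfl <;> simp only [vblock, voff] <;> omega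
    have hbits : Bits (RunBlk Ar len) len s_111452.mem (fOf e) :=
      hinv.fb.vorbis.bits.frame_fields (Bits.SameFields.of_same hobj)
    have habi : abiInv s_111452 := by v_inv
    have hst := Stable.carry hat.toStable hs hsp hun w_rsp w_eq habi hbits
    obtain ⟨ech, emode, efy, efloor⟩ := config_carry hinv he_room he_top hs hsp
    have hm := mode_record_inside hat.pre
    refine ReachVia.done ?_
    refine { toStable := hst, rip := w_rip, g := ?g, rbp := ?rbp, slot_j := ?sj, j_le := Nat.zero_le _, slot_offset := ?soff,
             slot_i := ?si, i_lt := ?ilt, slot_finalY := ?sfy, slot_map := ?smap }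
    case g =>
      -- `r15 = g`: untouched; the floor records read the same
      rw [w_kept .r15 rfl]
      exact efloor _ hat.g
    case rbp =>
      rw [w_kept .rbp rfl]
      exact hat.rbp
    case sj =>
      simp only [slot32, spOf, addr_norm]
      exact k_j
    case soff =>
      rw [Floor1.dimSum_zero]
      simp only [slot32, spOf, addr_norm]
      exact k_off
    case si =>
      simp only [slot32, spOf, addr_norm]
      exact k_i
    case ilt =>
      rw [ech]
      exact hilt
    case sfy =>
      rw [efy i hi16, hfy]
      simp only [slot64, spOf, addr_norm]
      exact k_fy
    case smap =>
      rw [(emode (mOf e) hm.1 hm.2).2, ← hat.r13]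
      simp only [slot64, spOf, addr_norm]
      exact k_map
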